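-- pv_equiv track=rewrite | github.com/yuezih/playground | Hopscotch/solution.py | getRoads
-- ===== SOURCE A (Python) =====
-- from itertools import combinations
--
-- NodesEmbedding = [
--     0b100000000000000100,   # 0
--     0b110000000000010000,   # 1
--     0b000100000000000110,   # 2
--     0b111000100000100000,   # 3
--     0b000110100000011000,   # 4
--     0b000001100000000111,   # 5
--     0b011000010000000000,   # 6
--     0b000110011000100000,   # 7
--     0b000001011000011000,   # 8
--     0b000000001000000011,   # 9
--     0b001000000100000000,   # 10
--     0b000010000110000000,   # 11
--     0b000001000111100000,   # 12
--     0b000000000011001000,   # 13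
--     0b000000000001000001    # 14
-- ]
--
-- NodesUnoccupied = list(range(15))
--
-- def isSameRow(n1, n2, n3):
--     return bool(NodesEmbedding[n1] & NodesEmbedding[n2] & NodesEmbedding[n3])
--
-- def getRoads(n):
--     options_all = list(combinations(NodesUnoccupied, 2))
--     options = []
--     for option in options_all:
--         if isSameRow(n, option[0], option[1]) is True\
--                 and ((n < option[0] and n < option[1]) or (n > option[0] and n > option[1])):
--             options.append(option)
--     return options
-- ===== SOURCE B (Python) =====
-- NodesEmbedding = [
--     0b100000000000000100,   # 0
--     0b110000000000010000,   # 1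
--     0b000100000000000110,   # 2
--     0b111000100000100000,   # 3
--     0b000110100000011000,   # 4
--     0b000001100000000111,   # 5
--     0b011000010000000000,   # 6
--     0b000110011000100000,   # 7
--     0b000001011000011000,   # 8
--     0b000000001000000011,   # 9
--     0b001000000100000000,   # 10
--     0b000010000110000000,   # 11
--     0b000001000111100000,   # 12
--     0b000000000011001000,   # 13
--     0b000000000001000001    # 14
-- ]
--
-- def getRoads(n):
--     # each bit of the embedding is one row of the board: walk only the rows
--     # through node n, pair up the nodes lying on that row, keep the pairs on
--     # one side of n, and sort the collected pairs lexicographically.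
--     emb = NodesEmbedding[n]
--     roads = set()
--     for k in range(18):
--         bit = 1 << k
--         if emb & bit:
--             row = [m for m in range(15) if NodesEmbedding[m] & bit]
--             for a in range(len(row)):
--                 for b in range(a + 1, len(row)):
--                     i, j = row[a], row[b]
--                     if j < n or n < i:
--                         roads.add((i, j))
--     return sorted(roads)
-- ===== Notes on version B (the rewrite author's own statement) =====
-- stated objective: alternative
-- what changed: Instead of generating all 105 combinations of the 15 nodes and filtering by same-row plus the both-below/both-above-n test, B walks only the rows (embedding bits) through node n, pairs up each row's nodes, keeps pairs on one side of n, and sorts the collected set.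
import Mathlib
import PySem

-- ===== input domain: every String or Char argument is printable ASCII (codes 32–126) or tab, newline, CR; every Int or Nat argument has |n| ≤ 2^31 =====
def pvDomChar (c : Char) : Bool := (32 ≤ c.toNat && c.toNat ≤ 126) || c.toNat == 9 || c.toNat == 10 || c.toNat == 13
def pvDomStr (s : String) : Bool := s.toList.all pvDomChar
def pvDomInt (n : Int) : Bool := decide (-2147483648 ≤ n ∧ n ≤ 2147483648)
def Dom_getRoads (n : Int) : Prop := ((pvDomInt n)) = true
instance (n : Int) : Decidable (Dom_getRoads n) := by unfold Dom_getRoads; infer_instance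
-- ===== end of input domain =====

-- B replaces A's filter over all 105 node combinations by a row-driven collection:
-- it walks only the rows (embedding bits) through node n, pairs up each row's nodes,
-- keeps the pairs on one side of n and sorts the collected set lexicographically.

-- shared module context: the NodesEmbedding table
def nodesEmbedding : List Int :=
  [0b100000000000000100, 0b110000000000010000, 0b000100000000000110,
   0b111000100000100000, 0b000110100000011000, 0b000001100000000111,
   0b011000010000000000, 0b000110011000100000, 0b000001011000011000,
   0b000000001000000011, 0b001000000100000000, 0b000010000110000000,
   0b000001000111100000, 0b000000000011001000, 0b000000000001000001]

-- NodesEmbedding[k]; total via getD 0, exact whenever the index is in Python range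
-- (Pre_ restricts n to -15..14, and all other indices used are in 0..14)
def nodeEmb (k : Int) : Int := (PySem.List.pyGet? nodesEmbedding k).getD 0

-- ===== PORT A =====
def isSameRow (n1 n2 n3 : Int) : Bool :=
  decide (Int.land (Int.land (nodeEmb n1) (nodeEmb n2)) (nodeEmb n3) ≠ 0)

-- itertools.combinations(xs, 2) in lexicographic order
def combinations2 (xs : List Int) : List (Int × Int) :=
  match xs with
  | [] => []
  | x :: rest => rest.map (fun y => (x, y)) ++ combinations2 rest

def getRoads (n : Int) : List (Int × Int) :=
  let optionsAll := combinations2 ((PySem.List.pyRange 0 15 1))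
  optionsAll.foldl (fun options option =>
    if isSameRow n option.1 option.2 = true ∧
        ((n < option.1 ∧ n < option.2) ∨ (n > option.1 ∧ n > option.2)) then
      options ++ [option]
    else options) []

-- ===== PORT B =====
def getRoads_alt (n : Int) : List (Int × Int) :=
  let emb := nodeEmb n
  let roads := (PySem.List.pyRange 0 18 1).foldl (fun roads k =>
    let bit : Int := 2 ^ k.toNat      -- 1 << k with k ≥ 0 (from range(18)): exact
    if Int.land emb bit ≠ 0 then
      let row := (PySem.List.pyRange 0 15 1).filter
        (fun m => decide (Int.land (nodeEmb m) bit ≠ 0))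
      (PySem.List.pyRange 0 (row.length : Int) 1).foldl (fun roads a =>
        (PySem.List.pyRange (a + 1) (row.length : Int) 1).foldl (fun roads b =>
          let i := (PySem.List.pyGet? row a).getD 0
          let j := (PySem.List.pyGet? row b).getD 0
          if j < n ∨ n < i then PySem.Set.add roads (i, j) else roads) roads) roads
    else roads) PySem.Set.empty
  PySem.List.sorted2 roads (fun p => p.1) (fun p => p.2) false

-- ===== PRECONDITION & SPEC =====
-- Pre_ excludes exactly the inputs where A raises IndexError (n ≥ 15 or n ≤ -16);
-- on every n with -15 ≤ n ≤ 14 A returns (Python's negative indexing) and B matches it.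
def Pre_getRoads (n : Int) : Prop := -15 ≤ n ∧ n ≤ 14
instance (n : Int) : Decidable (Pre_getRoads n) := by unfold Pre_getRoads; infer_instance
def pvWitness_getRoads : Int := (7)

def Spec_getRoads (n : Int) (out : List (Int × Int)) : Prop := out = getRoads_alt n
instance (n : Int) (out : List (Int × Int)) : Decidable (Spec_getRoads n out) := by unfold Spec_getRoads; infer_instance

-- ===== CLAIM (what is proved, stated in full; the proofs are below) =====
def Claim_equal_getRoads : Prop := ∀ (n : Int), Dom_getRoads n → Pre_getRoads n → Spec_getRoads n (getRoads n)

-- ===== LEMMAS AND PROOFS =====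

-- ===== VERDICT (by name: the statement is the Claim_ definition above) =====
theorem getRoads_spec : Claim_equal_getRoads := by
  intro n _ hpre
  unfold Spec_getRoads
  obtain ⟨h0, h15⟩ := hpre
  interval_cases n <;> decide
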